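-- pv_equiv track=rewrite | github.com/sidmonk/python | algoritmy/генерация всех перестановок.py | generate_list_accomodations
-- ===== SOURCE A (Python) =====
-- def generate_list_accomodations(l, k=-1):
--     """Генерирует все возможные перестановки в списке. На выходе - список строк"""
--     l = sorted(list(l))
--     n = len(l)
--     k = n if k == -1 or k > n else k
--     permutations = []
--
--     def generator(l, k, prefix=None):
--         prefix = prefix or []
--         if k == 0:
--             permutations.append(' '.join([str(i) for i in prefix]))
--         else:
--             for i in l:
--                 if i in prefix:
--                     continue
--                 generator(l, k-1, prefix+[i])
--
--     generator(l, k)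
--     return permutations
-- ===== SOURCE B (Python) =====
-- def generate_list_accomodations(l, k=-1):
--     """Все k-перестановки (по значениям) списка, списком строк."""
--     l = sorted(l)
--     n = len(l)
--     k = n if k == -1 or k > n else k
--     if k < 0:
--         return []
--     prefixes = [[]]
--     for _ in range(k):
--         prefixes = [p + [v] for p in prefixes for v in l if v not in p]
--     return [' '.join(str(i) for i in p) for p in prefixes]
-- ===== Notes on version B (the rewrite author's own statement) =====
-- stated objective: alternative
-- what changed: Replaces A's recursive DFS generator (which appends completed prefixes via a closure) with an iterative breadth-first loop that extends a list of prefixes one position per round, k rounds of a list comprehension, then joins each final prefix.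
import Mathlib
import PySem

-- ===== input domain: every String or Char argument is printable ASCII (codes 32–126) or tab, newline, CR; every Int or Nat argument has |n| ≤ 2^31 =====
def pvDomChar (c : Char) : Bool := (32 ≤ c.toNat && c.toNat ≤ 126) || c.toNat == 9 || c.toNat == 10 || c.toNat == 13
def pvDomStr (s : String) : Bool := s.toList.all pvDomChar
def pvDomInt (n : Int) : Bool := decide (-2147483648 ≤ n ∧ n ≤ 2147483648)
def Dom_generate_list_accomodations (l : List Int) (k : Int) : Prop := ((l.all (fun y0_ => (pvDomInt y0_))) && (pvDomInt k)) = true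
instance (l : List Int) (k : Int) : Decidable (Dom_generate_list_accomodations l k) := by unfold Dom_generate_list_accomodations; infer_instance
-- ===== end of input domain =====

-- B replaces A's recursive DFS generator by an iterative level-by-level (breadth-first)
-- expansion of prefix lists; objective: simpler/alternative, same output, no speed claim.

-- ===== PORT A =====
-- termination helper for A's recursion (cited by decreasing_by): appending a fresh
-- element of l to the prefix strictly shrinks the set of l-values not yet in the prefix
theorem pvFilterLt (l pre : List Int) (i : Int) (hi : i ∈ l) (hp : i ∉ pre) :
    (l.filter (fun x => decide (x ∉ pre ++ [i]))).length <
      (l.filter (fun x => decide (x ∉ pre))).length := by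
  induction l with
  | nil => cases hi
  | cons a t ih =>
    rw [List.filter_cons, List.filter_cons]
    by_cases hai : a = i
    · subst hai
      have h1 : (decide (a ∉ pre ++ [a])) = false := by simp
      have h2 : (decide (a ∉ pre)) = true := by simpa using hp
      rw [h1, h2]
      have hmono : List.Sublist (t.filter (fun x => decide (x ∉ pre ++ [a])))
          (t.filter (fun x => decide (x ∉ pre))) := by
        apply List.monotone_filter_right
        intro x hx
        simp only [decide_eq_true_eq] at hx ⊢
        intro hmem; exact hx (by simp [hmem])
      have := hmono.length_le
      simp only [if_true, Bool.false_eq_true, if_false, List.length_cons]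
      omega
    · have hit : i ∈ t := by cases hi with
        | head => exact absurd rfl hai
        | tail _ h => exact h
      have hagree : (decide (a ∉ pre ++ [i])) = (decide (a ∉ pre)) := by
        simp only [decide_eq_decide, List.mem_append, List.mem_singleton]
        constructor
        · intro h hmem; exact h (Or.inl hmem)
        · intro h hmem; rcases hmem with h1 | h1
          · exact h h1
          · exact hai h1
      have := ih hit
      rw [hagree]
      cases hd : (decide (a ∉ pre)) with
      | false =>
        simp only [Bool.false_eq_true, if_false]
        exact this
      | true =>
        simp only [if_true, List.length_cons]
        omega

def pvJoinA (pre : List Int) : String :=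
  PySem.Str.join " " (pre.map (fun i => PySem.Int.toStr i))

mutual
-- inner recursive generator of A (prefix DFS); l.attach carries membership for termination
def pvGenA (l : List Int) (k : Int) (pre : List Int) : List String :=
  if k = 0 then [pvJoinA pre]
  else pvLoopA l l.attach k pre
termination_by ((l.filter (fun x => decide (x ∉ pre))).length, 1, 0)
decreasing_by
  exact Prod.Lex.right _ (Prod.Lex.left _ _ (by omega))

-- the 'for i in l: if i in prefix: continue; recurse' loop of A
def pvLoopA (l : List Int) (rem : List {x : Int // x ∈ l}) (k : Int) (pre : List Int) :
    List String :=
  match rem with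
  | [] => []
  | i :: rest =>
      (if h : i.1 ∈ pre then [] else pvGenA l (k - 1) (pre ++ [i.1])) ++ pvLoopA l rest k pre
termination_by ((l.filter (fun x => decide (x ∉ pre))).length, 0, rem.length)
decreasing_by
  · exact Prod.Lex.left _ _ (pvFilterLt l pre i.1 i.2 h)
  · exact Prod.Lex.right _ (Prod.Lex.right _ (by simp))
end

def generate_list_accomodations (l : List Int) (k : Int) : List String :=
  let ls := PySem.List.sorted l (fun x => x) false
  let n : Int := ls.length
  let k := if k = -1 ∨ k > n then n else k
  pvGenA ls k []

-- ===== PORT B =====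
-- one pass of B's loop body: prefixes = [p + [v] for p in prefixes for v in l if v not in p]
def pvStepB (l : List Int) (ps : List (List Int)) : List (List Int) :=
  ps.flatMap (fun p => (l.filter (fun v => decide (v ∉ p))).map (fun v => p ++ [v]))

def generate_list_accomodations_alt (l : List Int) (k : Int) : List String :=
  let ls := PySem.List.sorted l (fun x => x) false
  let n : Int := ls.length
  let k := if k = -1 ∨ k > n then n else k
  if k < 0 then []
  else
    -- for _ in range(k): …; k ≥ 0 in this branch so List.range k.toNat is exactly range(k)
    (((List.range k.toNat).foldl (fun ps _ => pvStepB ls ps) [[]]).map pvJoinA)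

-- ===== PRECONDITION & SPEC =====
def Spec_generate_list_accomodations (l : List Int) (k : Int) (out : List String) : Prop := out = generate_list_accomodations_alt l k
instance (l : List Int) (k : Int) (out : List String) : Decidable (Spec_generate_list_accomodations l k out) := by unfold Spec_generate_list_accomodations; infer_instance

-- ===== CLAIM (what is proved, stated in full; the proofs are below) =====
def Claim_equal_generate_list_accomodations : Prop := ∀ (l : List Int) (k : Int), Dom_generate_list_accomodations l k → Spec_generate_list_accomodations l k (generate_list_accomodations l k)

-- ===== LEMMAS AND PROOFS =====

-- mathematical form of the prefix expansion, shared characterisation of both ports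
def pvExt (l : List Int) : Nat → List Int → List (List Int)
  | 0, pre => [pre]
  | m + 1, pre =>
      (l.filter (fun x => decide (x ∉ pre))).flatMap (fun i => pvExt l m (pre ++ [i]))

theorem pvLoopA_eq (l : List Int) (rem : List {x : Int // x ∈ l}) (k : Int) (pre : List Int) :
    pvLoopA l rem k pre =
      rem.flatMap (fun i => if i.1 ∈ pre then [] else pvGenA l (k - 1) (pre ++ [i.1])) := by
  induction rem with
  | nil => rw [pvLoopA]; rfl
  | cons i rest ih => rw [pvLoopA, ih]; simp [List.flatMap_cons]

theorem pvFlatMapIf (l pre : List Int) (g : Int → List String) :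
    l.flatMap (fun i => if i ∈ pre then [] else g i) =
      (l.filter (fun x => decide (x ∉ pre))).flatMap g := by
  induction l with
  | nil => rfl
  | cons a t ih =>
    by_cases h : a ∈ pre
    · simp [List.flatMap_cons, h, ih]
    · simp [List.flatMap_cons, h, ih]

theorem pvAttachFlatMap {α β : Type} (l : List α) (f : α → List β) :
    l.attach.flatMap (fun i => f i.1) = l.flatMap f := by
  conv_rhs => rw [← List.attach_map_subtype_val l]
  rw [List.flatMap_map]

theorem pvGenA_ne (l : List Int) (k : Int) (pre : List Int) (hk : k ≠ 0) :
    pvGenA l k pre =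
      (l.filter (fun x => decide (x ∉ pre))).flatMap (fun i => pvGenA l (k - 1) (pre ++ [i])) := by
  rw [pvGenA, if_neg hk, pvLoopA_eq,
    pvAttachFlatMap l (fun i => if i ∈ pre then [] else pvGenA l (k - 1) (pre ++ [i])),
    pvFlatMapIf]

-- A returns [] for negative k: the recursion saturates the prefix and appends nothing
theorem pvGenA_neg (l : List Int) :
    ∀ c k pre, (l.filter (fun x => decide (x ∉ pre))).length ≤ c → k < 0 →
      pvGenA l k pre = [] := by
  intro c
  induction c with
  | zero =>
    intro k pre hc hk
    rw [pvGenA_ne l k pre (by omega)]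
    have h0 : l.filter (fun x => decide (x ∉ pre)) = [] := List.eq_nil_of_length_eq_zero (by omega)
    rw [h0]
    rfl
  | succ c ih =>
    intro k pre hc hk
    rw [pvGenA_ne l k pre (by omega)]
    rw [List.flatMap_eq_nil_iff]
    intro i hi
    rw [List.mem_filter] at hi
    have hmem : i ∈ l := hi.1
    have hnp : i ∉ pre := by simpa using hi.2
    have hlt := pvFilterLt l pre i hmem hnp
    exact ih (k - 1) (pre ++ [i]) (by omega) (by omega)

theorem pvGenA_eq_ext (l : List Int) :
    ∀ (m : Nat) (pre : List Int), pvGenA l (m : Int) pre = (pvExt l m pre).map pvJoinA := by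
  intro m
  induction m with
  | zero => intro pre; rw [pvGenA]; simp [pvExt]
  | succ m ih =>
    intro pre
    rw [pvGenA_ne l _ pre (by exact_mod_cast Nat.succ_ne_zero m)]
    have hcast : ((m + 1 : Nat) : Int) - 1 = (m : Int) := by push_cast; ring
    rw [hcast]
    simp only [pvExt, List.map_flatMap]
    exact List.flatMap_congr (fun i _ => ih (pre ++ [i]))

theorem pvFoldl_eq_iter (l : List Int) (m : Nat) (S : List (List Int)) :
    (List.range m).foldl (fun ps _ => pvStepB l ps) S = (pvStepB l)^[m] S := by
  induction m with
  | zero => rfl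
  | succ m ih =>
    rw [List.range_succ, List.foldl_append, ih, List.foldl_cons, List.foldl_nil,
      Function.iterate_succ_apply']

theorem pvIter_eq_ext (l : List Int) :
    ∀ (m : Nat) (S : List (List Int)), (pvStepB l)^[m] S = S.flatMap (fun p => pvExt l m p) := by
  intro m
  induction m with
  | zero => intro S; simp [pvExt]
  | succ m ih =>
    intro S
    rw [Function.iterate_succ_apply, ih]
    simp only [pvStepB]
    rw [List.flatMap_assoc]
    apply List.flatMap_congr
    intro p _
    rw [List.flatMap_map]
    rfl

-- ===== VERDICT (by name: the statement is the Claim_ definition above) =====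
theorem pvMain (ls : List Int) (k' : Int) :
    pvGenA ls k' [] =
      if k' < 0 then []
      else (((List.range k'.toNat).foldl (fun ps _ => pvStepB ls ps) [[]]).map pvJoinA) := by
  by_cases hneg : k' < 0
  · rw [if_pos hneg]
    exact pvGenA_neg ls _ k' [] le_rfl hneg
  · rw [if_neg hneg]
    have hk0 : k' = (k'.toNat : Int) := (Int.toNat_of_nonneg (by omega)).symm
    rw [hk0, pvGenA_eq_ext, pvFoldl_eq_iter, pvIter_eq_ext]
    simp only [List.flatMap_cons, List.flatMap_nil, List.append_nil]
    rfl

theorem generate_list_accomodations_spec : Claim_equal_generate_list_accomodations := by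
  intro l k _
  show generate_list_accomodations l k = generate_list_accomodations_alt l k
  unfold generate_list_accomodations generate_list_accomodations_alt
  exact pvMain _ _
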